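-- pv_equiv track=rewrite | github.com/eulersformula/Lintcode-LeetCode | People_Counting.py | people_counting
-- ===== SOURCE A (Python) =====
-- from typing import (
--     List,
-- )
--
-- def people_counting(wage: List[int], ask: List[int]) -> List[int]:
--     # write your code here
--     wage_count = dict()
--     for w in wage:
--         if w not in wage_count:
--             wage_count[w] = 0
--         wage_count[w] += 1
--     res = []
--     for a in ask:
--         if a in wage_count:
--             res.append(wage_count[a])
--         else:
--             res.append(0)
--     return res
-- ===== SOURCE B (Python) =====
-- from typing import (
--     List,
-- )
--
-- def people_counting(wage: List[int], ask: List[int]) -> List[int]: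
--     # Sort a copy of wage, then answer each query with two hand-rolled
--     # binary searches: count = upper_bound - lower_bound (0 when absent).
--     srt = sorted(wage)
--     n = len(srt)
--
--     def lower(x):
--         lo, hi = 0, n
--         while lo < hi:
--             mid = (lo + hi) // 2
--             if srt[mid] < x:
--                 lo = mid + 1
--             else:
--                 hi = mid
--         return lo
--
--     def upper(x):
--         lo, hi = 0, n
--         while lo < hi:
--             mid = (lo + hi) // 2
--             if x < srt[mid]:
--                 hi = mid
--             else:
--                 lo = mid + 1
--         return lo
--
--     return [upper(a) - lower(a) for a in ask]
-- ===== Notes on version B (the rewrite author's own statement) =====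
-- stated objective: alternative
-- what changed: Replaces the hash frequency table with a sorted copy of wage queried by two hand-written binary searches (upper_bound - lower_bound) per asked value.
import Mathlib
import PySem

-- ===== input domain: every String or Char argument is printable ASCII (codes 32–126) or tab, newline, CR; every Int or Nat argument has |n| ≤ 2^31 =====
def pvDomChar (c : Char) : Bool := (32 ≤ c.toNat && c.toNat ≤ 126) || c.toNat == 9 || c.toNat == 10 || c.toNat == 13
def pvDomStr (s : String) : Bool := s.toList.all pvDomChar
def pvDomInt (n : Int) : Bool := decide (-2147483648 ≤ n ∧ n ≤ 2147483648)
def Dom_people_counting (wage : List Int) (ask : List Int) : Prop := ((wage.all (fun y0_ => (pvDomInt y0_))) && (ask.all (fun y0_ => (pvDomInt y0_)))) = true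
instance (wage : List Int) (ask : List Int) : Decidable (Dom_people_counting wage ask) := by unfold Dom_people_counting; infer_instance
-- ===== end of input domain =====

-- B replaces A's hash frequency table by a sorted copy of wage queried with two
-- hand-written binary searches per asked value (alternative algorithm, same results).

-- ===== PORT A =====
def people_counting (wage : List Int) (ask : List Int) : List Int :=
  let wage_count := wage.foldl (fun d w =>
      let d := if d.contains w then d else d.insert w 0
      d.modify w 0 (· + 1)) PySem.Dict.empty
  ask.foldl (fun res a =>
      res ++ [if wage_count.contains a then wage_count.getD a 0 else 0]) []

-- ===== PORT B =====
-- hand-written binary search loops, transliterating Source B's `lower` / `upper`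
-- (the while-loop is run on a structural fuel ≥ hi - lo, which never runs out)
def pvLowerGo (srt : List Int) (x : Int) : Nat → Nat → Nat → Nat
  | 0, lo, _ => lo
  | n + 1, lo, hi =>
    if lo < hi then
      let mid := (lo + hi) / 2
      if srt.getD mid 0 < x then pvLowerGo srt x n (mid + 1) hi
      else pvLowerGo srt x n lo mid
    else lo

def pvLower (srt : List Int) (x : Int) (lo hi : Nat) : Nat :=
  pvLowerGo srt x (hi - lo) lo hi

def pvUpperGo (srt : List Int) (x : Int) : Nat → Nat → Nat → Nat
  | 0, lo, _ => lo
  | n + 1, lo, hi =>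
    if lo < hi then
      let mid := (lo + hi) / 2
      if x < srt.getD mid 0 then pvUpperGo srt x n lo mid
      else pvUpperGo srt x n (mid + 1) hi
    else lo

def pvUpper (srt : List Int) (x : Int) (lo hi : Nat) : Nat :=
  pvUpperGo srt x (hi - lo) lo hi

def people_counting_alt (wage : List Int) (ask : List Int) : List Int :=
  let srt := PySem.List.sorted wage (fun v => v) false
  ask.map (fun a =>
    ((pvUpper srt a 0 srt.length : Int) - (pvLower srt a 0 srt.length : Int)))

-- ===== PRECONDITION & SPEC =====
def Spec_people_counting (wage : List Int) (ask : List Int) (out : List Int) : Prop := out = people_counting_alt wage ask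
instance (wage : List Int) (ask : List Int) (out : List Int) : Decidable (Spec_people_counting wage ask out) := by unfold Spec_people_counting; infer_instance

-- ===== CLAIM (what is proved, stated in full; the proofs are below) =====
def Claim_equal_people_counting : Prop := ∀ (wage : List Int) (ask : List Int), Dom_people_counting wage ask → Spec_people_counting wage ask (people_counting wage ask)

-- ===== LEMMAS AND PROOFS =====

-- monotone indexing into a Pairwise-(≤) list
lemma pairwise_getElem_mono (srt : List Int) (hp : srt.Pairwise (· ≤ ·))
    {i j : Nat} (hij : i ≤ j) (hj : j < srt.length) : srt[i]'(by omega) ≤ srt[j] := by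
  rcases Nat.lt_or_ge i j with h | h
  · exact (List.pairwise_iff_getElem.mp hp) i j (by omega) hj h
  · have : i = j := by omega
    subst this; exact le_refl _

-- invariant of Source B's `lower` loop (induction on the fuel)
lemma pvLowerGo_spec (srt : List Int) (x : Int) (hp : srt.Pairwise (· ≤ ·)) :
    ∀ (n lo hi : Nat), hi - lo ≤ n → lo ≤ hi → hi ≤ srt.length →
    (∀ j (_ : j < srt.length), j < lo → srt[j] < x) →
    (∀ j (h : j < srt.length), hi ≤ j → x ≤ srt[j]) →
    lo ≤ pvLowerGo srt x n lo hi ∧ pvLowerGo srt x n lo hi ≤ hi ∧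
    (∀ j (_ : j < srt.length), j < pvLowerGo srt x n lo hi → srt[j] < x) ∧
    (∀ j (h : j < srt.length), pvLowerGo srt x n lo hi ≤ j → x ≤ srt[j]) := by
  intro n
  induction n with
  | zero =>
    intro lo hi hn hle hhi Hlo Hhi
    simp only [pvLowerGo]
    exact ⟨le_refl _, hle, Hlo, fun j hj hjge => Hhi j hj (by omega)⟩
  | succ n ih =>
    intro lo hi hn hle hhi Hlo Hhi
    simp only [pvLowerGo]
    by_cases h : lo < hi
    · rw [if_pos h]
      have hmid : (lo + hi) / 2 < srt.length := by omega
      have hget : srt.getD ((lo + hi) / 2) 0 = srt[(lo + hi) / 2] :=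
        List.getD_eq_getElem srt 0 hmid
      by_cases hc : srt.getD ((lo + hi) / 2) 0 < x
      · rw [if_pos hc]
        rw [hget] at hc
        have hres := ih ((lo + hi) / 2 + 1) hi (by omega) (by omega) hhi
          (fun j hj hjlt =>
            lt_of_le_of_lt (pairwise_getElem_mono srt hp (by omega) hmid) hc)
          Hhi
        exact ⟨by omega, hres.2.1, hres.2.2.1, hres.2.2.2⟩
      · rw [if_neg hc]
        rw [hget] at hc
        have hc' : x ≤ srt[(lo + hi) / 2] := by omega
        have hres := ih lo ((lo + hi) / 2) (by omega) (by omega) (by omega) Hlo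
          (fun j hj hjge => le_trans hc' (pairwise_getElem_mono srt hp hjge hj))
        exact ⟨hres.1, by omega, hres.2.2.1, hres.2.2.2⟩
    · rw [if_neg h]
      exact ⟨le_refl _, hle, Hlo, fun j hj hjge => Hhi j hj (by omega)⟩

-- invariant of Source B's `upper` loop (induction on the fuel)
lemma pvUpperGo_spec (srt : List Int) (x : Int) (hp : srt.Pairwise (· ≤ ·)) :
    ∀ (n lo hi : Nat), hi - lo ≤ n → lo ≤ hi → hi ≤ srt.length →
    (∀ j (_ : j < srt.length), j < lo → srt[j] ≤ x) →
    (∀ j (h : j < srt.length), hi ≤ j → x < srt[j]) →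
    lo ≤ pvUpperGo srt x n lo hi ∧ pvUpperGo srt x n lo hi ≤ hi ∧
    (∀ j (_ : j < srt.length), j < pvUpperGo srt x n lo hi → srt[j] ≤ x) ∧
    (∀ j (h : j < srt.length), pvUpperGo srt x n lo hi ≤ j → x < srt[j]) := by
  intro n
  induction n with
  | zero =>
    intro lo hi hn hle hhi Hlo Hhi
    simp only [pvUpperGo]
    exact ⟨le_refl _, hle, Hlo, fun j hj hjge => Hhi j hj (by omega)⟩
  | succ n ih =>
    intro lo hi hn hle hhi Hlo Hhi
    simp only [pvUpperGo]
    by_cases h : lo < hi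
    · rw [if_pos h]
      have hmid : (lo + hi) / 2 < srt.length := by omega
      have hget : srt.getD ((lo + hi) / 2) 0 = srt[(lo + hi) / 2] :=
        List.getD_eq_getElem srt 0 hmid
      by_cases hc : x < srt.getD ((lo + hi) / 2) 0
      · rw [if_pos hc]
        rw [hget] at hc
        have hres := ih lo ((lo + hi) / 2) (by omega) (by omega) (by omega) Hlo
          (fun j hj hjge =>
            lt_of_lt_of_le hc (pairwise_getElem_mono srt hp hjge hj))
        exact ⟨hres.1, by omega, hres.2.2.1, hres.2.2.2⟩
      · rw [if_neg hc]
        rw [hget] at hc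
        have hc' : srt[(lo + hi) / 2] ≤ x := by omega
        have hres := ih ((lo + hi) / 2 + 1) hi (by omega) (by omega) hhi
          (fun j hj hjlt =>
            le_trans (pairwise_getElem_mono srt hp (by omega) hmid) hc')
          Hhi
        exact ⟨by omega, hres.2.1, hres.2.2.1, hres.2.2.2⟩
    · rw [if_neg h]
      exact ⟨le_refl _, hle, Hlo, fun j hj hjge => Hhi j hj (by omega)⟩

lemma upper_sub_lower_eq_count (srt : List Int) (x : Int) (hp : srt.Pairwise (· ≤ ·)) :
    ((pvUpper srt x 0 srt.length : Int) - (pvLower srt x 0 srt.length : Int)) =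
      (srt.count x : Int) := by
  unfold pvLower pvUpper
  obtain ⟨-, hlu, hllt, hlge⟩ := pvLowerGo_spec srt x hp (srt.length - 0) 0 srt.length
    (by omega) (Nat.zero_le _) (le_refl _) (by omega) (by omega)
  obtain ⟨-, huu, hult, huge⟩ := pvUpperGo_spec srt x hp (srt.length - 0) 0 srt.length
    (by omega) (Nat.zero_le _) (le_refl _) (by omega) (by omega)
  set lo := pvLowerGo srt x (srt.length - 0) 0 srt.length with hlo
  set up := pvUpperGo srt x (srt.length - 0) 0 srt.length with hup
  have hle : lo ≤ up := by
    by_contra hc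
    rw [Nat.not_le] at hc
    have h1 := hllt up (by omega) hc
    have h2 := huge up (by omega) (le_refl _)
    omega
  -- decompose srt = take lo ++ middle ++ rest, count each part
  have hdecomp : srt =
      srt.take lo ++ ((srt.drop lo).take (up - lo) ++ (srt.drop lo).drop (up - lo)) := by
    rw [List.take_append_drop, List.take_append_drop]
  have hcount1 : (srt.take lo).count x = 0 := by
    rw [List.count_eq_zero]
    intro hmem
    obtain ⟨j, hj, hx⟩ := List.mem_iff_getElem.mp hmem
    have hjl : j < lo := by simp [List.length_take] at hj; omega
    have := hllt j (by omega) hjl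
    rw [List.getElem_take] at hx
    omega
  have hrest : (srt.drop lo).drop (up - lo) = srt.drop up := by
    rw [List.drop_drop]
    congr 1
    omega
  have hcount3 : ((srt.drop lo).drop (up - lo)).count x = 0 := by
    rw [hrest, List.count_eq_zero]
    intro hmem
    obtain ⟨j, hj, hx⟩ := List.mem_iff_getElem.mp hmem
    rw [List.getElem_drop] at hx
    have := huge (up + j) (by simp at hj; omega) (by omega)
    omega
  have hmidlen : ((srt.drop lo).take (up - lo)).length = up - lo := by
    simp [List.length_take, List.length_drop]
    omega
  have hall : ∀ b ∈ (srt.drop lo).take (up - lo), x = b := by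
    intro b hmem
    obtain ⟨j, hj, hx⟩ := List.mem_iff_getElem.mp hmem
    rw [List.getElem_take, List.getElem_drop] at hx
    have hjn : lo + j < srt.length := by
      have := hj
      simp [List.length_take, List.length_drop] at this
      omega
    have h1 := hult (lo + j) hjn (by rw [hmidlen] at hj; omega)
    have h2 := hlge (lo + j) hjn (by omega)
    omega
  have hcount2 : ((srt.drop lo).take (up - lo)).count x = up - lo := by
    rw [List.count_eq_length.mpr hall, hmidlen]
  have hcnt : srt.count x = up - lo := by
    conv_lhs => rw [hdecomp]
    rw [List.count_append, List.count_append, hcount1, hcount2, hcount3]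
    omega
  omega

-- A's build step equals the plain counter step
lemma step_eq (d : PySem.Dict Int Int) (w : Int) :
    ((if d.contains w then d else d.insert w 0).modify w 0 (· + 1)) =
      d.modify w 0 (· + 1) := by
  cases h : d.contains w with
  | true => simp
  | false =>
    have hf : d.items.find? (fun p => p.1 == w) = none := by
      rw [List.find?_eq_none]
      intro p hp
      simp only [PySem.Dict.contains, List.any_eq_false] at h
      exact h p hp
    have hg : d.getD w 0 = 0 := by
      simp [PySem.Dict.getD, PySem.Dict.get?, hf]
    simp [PySem.Dict.modify, PySem.Dict.insert_insert_self, hg]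

-- A computes the per-query counts of wage
lemma people_counting_eq_map_count (wage ask : List Int) :
    people_counting wage ask = ask.map (fun a => (wage.count a : Int)) := by
  unfold people_counting
  have hc : wage.foldl (fun d w =>
      let d := if d.contains w then d else d.insert w 0
      d.modify w 0 (· + 1)) PySem.Dict.empty = PySem.Dict.counter wage := by
    have : (fun (d : PySem.Dict Int Int) (w : Int) =>
        let d := if d.contains w then d else d.insert w 0
        d.modify w 0 (· + 1)) = fun d w => d.modify w 0 (· + 1) := by
      funext d w; exact step_eq d w
    rw [this]; rfl
  simp only [hc]
  rw [PySem.List.foldl_append_singleton_eq_map]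
  simp only [List.nil_append]
  apply List.map_congr_left
  intro a _
  cases hmem : (wage.contains a) with
  | true =>
    rw [if_pos (by rw [PySem.Dict.contains_counter]; exact hmem)]
    exact PySem.Dict.getD_counter wage a
  | false =>
    rw [if_neg (by rw [PySem.Dict.contains_counter, hmem]; simp)]
    have : wage.count a = 0 := by
      rw [List.count_eq_zero]
      intro hmemw
      rw [List.contains_eq_mem] at hmem
      simp [hmemw] at hmem
    rw [this]; rfl

-- ===== VERDICT (by name: the statement is the Claim_ definition above) =====
theorem people_counting_spec : Claim_equal_people_counting := by
  intro wage ask _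
  unfold Spec_people_counting people_counting_alt
  rw [people_counting_eq_map_count]
  apply List.map_congr_left
  intro a _
  have hp : (PySem.List.sorted wage (fun v => v) false).Pairwise (· ≤ ·) :=
    PySem.List.sorted_pairwise wage (fun v => v)
  rw [upper_sub_lower_eq_count _ a hp]
  congr 1
  exact ((PySem.List.sorted_perm wage (fun v => v) false).count_eq a).symm
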